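-- pv_equiv track=rewrite | github.com/daniel-reich/ubiquitous-fiesta | 6DppMcokmzJ3TtNNB_8.py | true_alphabetic
-- ===== SOURCE A (Python) =====
-- def true_alphabetic(n):
--   a = sorted(n.replace(" ", ""))
--   b = ""
--   c = 0
--   for i in n:
--       if i != " ":
--           b += a[c]
--           c += 1
--       else: b += " "
--   return b
-- ===== SOURCE B (Python) =====
-- def true_alphabetic(n):
--     counts = [0] * 128
--     for ch in n:
--         if ch != ' ':
--             counts[ord(ch)] += 1
--     out = []
--     code = 0
--     for ch in n:
--         if ch == ' ':
--             out.append(' ')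
--         else:
--             while counts[code] == 0:
--                 code += 1
--             out.append(chr(code))
--             counts[code] -= 1
--     return ''.join(out)
-- ===== Notes on version B (the rewrite author's own statement) =====
-- stated objective: alternative
-- what changed: B replaces the comparison sort entirely by a counting sort: it tallies non-space characters into a 128-entry frequency table, then streams through the input emitting the smallest remaining character (via a monotone code pointer) at each non-space slot, never calling sorted().
import Mathlib
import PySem

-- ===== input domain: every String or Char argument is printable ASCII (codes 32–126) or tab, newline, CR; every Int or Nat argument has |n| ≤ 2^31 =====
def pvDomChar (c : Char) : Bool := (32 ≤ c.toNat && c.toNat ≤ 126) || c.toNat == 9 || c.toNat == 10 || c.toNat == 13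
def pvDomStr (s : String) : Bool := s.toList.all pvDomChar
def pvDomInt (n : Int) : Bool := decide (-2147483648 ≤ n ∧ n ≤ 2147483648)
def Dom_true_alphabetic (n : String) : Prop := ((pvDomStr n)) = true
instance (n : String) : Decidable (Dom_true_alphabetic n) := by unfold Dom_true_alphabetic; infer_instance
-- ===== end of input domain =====

-- B replaces A's comparison sort + counter pass by a counting sort: a 128-entry frequency
-- table of the non-space characters, then a single emitting pass with a monotone code
-- pointer; proved to return the same string (objective: alternative algorithm).


-- ===== PORT A =====
-- a = sorted(n.replace(" ", "")); then one pass over n with accumulator b and counter c.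
-- a[c] is ported as pyGetD with default ' ': on the branch that reads it, c < len(a)
-- always holds (c counts non-space characters consumed, len(a) is their total number),
-- so Python never raises here and the default is never used.
def true_alphabetic (n : String) : String :=
  let a : List Char := PySem.List.sorted (PySem.Str.replace n " " "").toList (fun c => c) false
  let bc := n.toList.foldl
    (fun (s : List Char × Nat) i =>
      if i ≠ ' ' then (s.1 ++ [PySem.List.pyGetD a (s.2 : Int) ' '], s.2 + 1)
      else (s.1 ++ [' '], s.2)) ([], 0)
  String.ofList bc.1

-- ===== PORT B =====
-- the while loop 'while counts[code] == 0: code += 1': on the Dom inputs the claim is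
-- about every character code is < 128, so the scan always finds a nonzero entry within
-- 128 steps; the fuel 128 makes that bounded scan structural (fuel is never exhausted
-- on the branch that runs it, see pvFindNext_spec below).
def pvFindNext (counts : List Nat) : Nat → Nat → Nat
  | code, 0 => code
  | code, f + 1 => if counts.getD code 0 = 0 then pvFindNext counts (code + 1) f else code

-- counts = [0]*128; counts[ord(ch)] += 1 for non-space ch (ord = Char.toNat, index < 128
-- on Dom, so List.getD/List.set are exact); then one pass: spaces copied, otherwise the
-- pointer advances to the smallest remaining code, chr(code) (= Char.ofNat) is emitted
-- and counts[code] is decremented; ''.join(out) = String.ofList.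
def true_alphabetic_alt (n : String) : String :=
  let counts := n.toList.foldl
    (fun cs ch => if ch ≠ ' ' then cs.set ch.toNat (cs.getD ch.toNat 0 + 1) else cs)
    (List.replicate 128 0)
  let s := n.toList.foldl
    (fun (s : List Char × List Nat × Nat) ch =>
      if ch = ' ' then (s.1 ++ [' '], s.2)
      else
        let j := pvFindNext s.2.1 s.2.2 128
        (s.1 ++ [Char.ofNat j], s.2.1.set j (s.2.1.getD j 0 - 1), j))
    ([], counts, 0)
  String.ofList s.1

-- ===== PRECONDITION & SPEC =====
def Spec_true_alphabetic (n : String) (out : String) : Prop := out = true_alphabetic_alt n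
instance (n : String) (out : String) : Decidable (Spec_true_alphabetic n out) := by unfold Spec_true_alphabetic; infer_instance

-- ===== CLAIM (what is proved, stated in full; the proofs are below) =====
def Claim_equal_true_alphabetic : Prop := ∀ (n : String), Dom_true_alphabetic n → Spec_true_alphabetic n (true_alphabetic n)

-- ===== LEMMAS AND PROOFS =====

-- common description of both results: spaces stay, other slots are filled in order from a
def pvFill : List Char → List Char → List Char
  | [], _ => []
  | x :: xs, a => if x = ' ' then ' ' :: pvFill xs a else a.headD ' ' :: pvFill xs a.tail

-- the list of characters a frequency table denotes, lowest code first
def pvExpand : List Nat → Nat → List Char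
  | [], _ => []
  | c :: cs, k => List.replicate c (Char.ofNat k) ++ pvExpand cs (k + 1)

lemma pvToNat_ofNat {j : Nat} (h : j < 128) : (Char.ofNat j).toNat = j := by
  have hv : Nat.isValidChar j := Or.inl (by omega)
  rw [Char.ofNat, dif_pos hv]
  simp [Char.toNat, Char.ofNatAux]

lemma pvChar_le_iff (a b : Char) : a ≤ b ↔ a.toNat ≤ b.toNat := by
  rw [Char.le_def]; exact UInt32.le_iff_toNat_le

lemma replace_go_space (fuel : Nat) : ∀ (l acc : List Char), l.length ≤ fuel →
    PySem.Chars.replace.go [' '] [] fuel l acc = acc.reverse ++ l.filter (fun c => c ≠ ' ') := by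
  induction fuel with
  | zero => intro l acc h
            have : l = [] := List.eq_nil_of_length_eq_zero (Nat.le_zero.mp h)
            subst this; simp [PySem.Chars.replace.go]
  | succ f ih =>
    intro l acc h
    cases l with
    | nil => simp [PySem.Chars.replace.go]
    | cons c t =>
      rw [PySem.Chars.replace.go]
      simp only [List.length_cons] at h
      by_cases hc : c = ' '
      · subst hc
        have hp : List.isPrefixOf [' '] (' ' :: t) = true := by
          simp [List.isPrefixOf]
        rw [if_pos hp]
        have hd : List.drop [' '].length (' ' :: t) = t := by simp
        rw [hd, ih _ _ (by omega)]
        simp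
      · have hp : List.isPrefixOf [' '] (c :: t) = false := by
          simp [List.isPrefixOf]
          exact fun h' => hc h'.symm
        rw [if_neg (by simp [hp])]
        rw [ih _ _ (by omega)]
        simp [hc]

lemma replace_space (s : List Char) :
    PySem.Chars.replace s [' '] [] = s.filter (fun c => c ≠ ' ') := by
  rw [PySem.Chars.replace]
  simp [replace_go_space s.length s [] le_rfl]

lemma replace_toList (n : String) :
    (PySem.Str.replace n " " "").toList = n.toList.filter (fun c => c ≠ ' ') := by
  rw [PySem.Str.toList_replace]
  rw [show " ".toList = [' '] from by decide, show "".toList = ([] : List Char) from by decide]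
  exact replace_space n.toList

-- A's loop, from counter c, appends pvFill of the rest against a.drop c
lemma loopA (a : List Char) : ∀ (l b : List Char) (c : Nat),
    a.length = c + (l.filter (fun x => x ≠ ' ')).length →
    (l.foldl (fun (s : List Char × Nat) i =>
        if i ≠ ' ' then (s.1 ++ [PySem.List.pyGetD a (s.2 : Int) ' '], s.2 + 1)
        else (s.1 ++ [' '], s.2)) (b, c)).1 = b ++ pvFill l (a.drop c) := by
  intro l
  induction l with
  | nil => intro b c h; simp [pvFill]
  | cons x xs ih =>
    intro b c h
    simp only [List.filter_cons] at h
    rw [List.foldl_cons]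
    by_cases hx : x = ' '
    · subst hx
      rw [if_neg (by simp : ¬(' ' ≠ ' '))]
      rw [ih (b ++ [' ']) c (by simpa using h)]
      simp [pvFill]
    · have hne : (decide ¬x = ' ') = true := by simp [hx]
      rw [hne] at h; simp only [if_pos] at h
      have hcnt : a.length = (c + 1) + (xs.filter (fun x => x ≠ ' ')).length := by
        simp at h ⊢; omega
      have hc : c < a.length := by omega
      have hdrop : a.drop c = a[c] :: a.drop (c + 1) := List.drop_eq_getElem_cons hc
      rw [if_pos (by simpa using hx)]
      rw [ih (b ++ [PySem.List.pyGetD a (c : Int) ' ']) (c + 1) hcnt]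
      have hget : PySem.List.pyGetD a (c : Int) ' ' = a[c] := by
        rw [PySem.List.pyGetD_natCast]
        simp [List.getD_eq_getElem?_getD, List.getElem?_eq_getElem hc]
      rw [pvFill, if_neg hx, hdrop]
      simp [hget, List.getElem?_eq_getElem hc]

-- every character of an expansion from k has code ≥ k (codes stay below 128)
lemma pvExpand_mem_ge : ∀ (cs : List Nat) (k : Nat), k + cs.length ≤ 128 →
    ∀ x ∈ pvExpand cs k, k ≤ x.toNat := by
  intro cs
  induction cs with
  | nil => intro k _ x hx; simp [pvExpand] at hx
  | cons c cs ih =>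
    intro k hk x hx
    simp only [pvExpand, List.mem_append, List.mem_replicate] at hx
    rcases hx with ⟨-, rfl⟩ | hx
    · rw [pvToNat_ofNat (by simp at hk; omega)]
    · have := ih (k + 1) (by simp at hk ⊢; omega) x hx
      omega

lemma pvExpand_pairwise : ∀ (cs : List Nat) (k : Nat), k + cs.length ≤ 128 →
    (pvExpand cs k).Pairwise (· ≤ ·) := by
  intro cs
  induction cs with
  | nil => intro k _; simp [pvExpand]
  | cons c cs ih =>
    intro k hk
    simp only [List.length_cons] at hk
    rw [pvExpand, List.pairwise_append]
    refine ⟨List.pairwise_replicate.mpr (Or.inr le_rfl), ih (k + 1) (by omega), ?_⟩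
    intro a ha b hb
    rw [List.mem_replicate] at ha
    have hb' := pvExpand_mem_ge cs (k + 1) (by omega) b hb
    rw [pvChar_le_iff, ha.2, pvToNat_ofNat (by omega)]
    omega

lemma pvExpand_replicate_zero : ∀ (m k : Nat), pvExpand (List.replicate m 0) k = [] := by
  intro m
  induction m with
  | zero => intro k; simp [pvExpand]
  | succ m ih => intro k; rw [List.replicate_succ]; simp [pvExpand, ih]

-- incrementing slot j inserts one character Char.ofNat (k + j) into the expansion
lemma pvExpand_set_succ : ∀ (cs : List Nat) (j k : Nat), j < cs.length →
    (pvExpand (cs.set j (cs.getD j 0 + 1)) k).Perm (Char.ofNat (k + j) :: pvExpand cs k) := by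
  intro cs
  induction cs with
  | nil => intro j k h; simp at h
  | cons c cs ih =>
    intro j k hj
    cases j with
    | zero =>
      simp only [List.set_cons_zero, List.getD_cons_zero, pvExpand, Nat.add_zero]
      rw [List.replicate_succ, List.cons_append]
    | succ j =>
      simp only [List.set_cons_succ, List.getD_cons_succ, pvExpand]
      have h1 := List.Perm.append_left (List.replicate c (Char.ofNat k))
        (ih j (k + 1) (by simpa using hj))
      rw [show k + (j + 1) = k + 1 + j from by omega]
      exact h1.trans List.perm_middle

-- the table-building loop: its expansion is a permutation of the non-space characters
lemma buildLoop : ∀ (l : List Char) (cs : List Nat),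
    (∀ ch ∈ l, ch.toNat < 128) → cs.length = 128 →
    (l.foldl (fun cs ch => if ch ≠ ' ' then cs.set ch.toNat (cs.getD ch.toNat 0 + 1) else cs) cs).length = 128 ∧
    (pvExpand (l.foldl (fun cs ch => if ch ≠ ' ' then cs.set ch.toNat (cs.getD ch.toNat 0 + 1) else cs) cs) 0).Perm
      (l.filter (fun c => c ≠ ' ') ++ pvExpand cs 0) := by
  intro l
  induction l with
  | nil => intro cs _ hlen; exact ⟨hlen, by simp⟩
  | cons ch l ih =>
    intro cs hdom hlen
    rw [List.foldl_cons, List.filter_cons]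
    by_cases hch : ch = ' '
    · subst hch
      rw [if_neg (by simp)]
      simpa using ih cs (fun c hc => hdom c (by simp [hc])) hlen
    · rw [if_pos (by simpa using hch), if_pos (by simpa using hch)]
      have hcode : ch.toNat < 128 := hdom ch (by simp)
      have hset : (cs.set ch.toNat (cs.getD ch.toNat 0 + 1)).length = 128 := by
        simpa using hlen
      obtain ⟨h1, h2⟩ := ih _ (fun c hc => hdom c (by simp [hc])) hset
      refine ⟨h1, ?_⟩
      have hins := pvExpand_set_succ cs ch.toNat 0 (by omega)
      rw [Nat.zero_add, Char.ofNat_toNat] at hins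
      exact (h2.trans (List.Perm.append_left _ hins)).trans List.perm_middle

-- the pointer scan: lands on the first nonzero slot, preserving the expansion
lemma pvFindNext_spec : ∀ (f : Nat) (cs : List Nat) (code : Nat), cs.length = 128 →
    128 - code ≤ f → pvExpand (cs.drop code) code ≠ [] →
    code ≤ pvFindNext cs code f ∧ pvFindNext cs code f < 128 ∧
    cs.getD (pvFindNext cs code f) 0 ≠ 0 ∧
    pvExpand (cs.drop code) code = pvExpand (cs.drop (pvFindNext cs code f)) (pvFindNext cs code f) := by
  intro f
  induction f with
  | zero =>
    intro cs code hlen hf hne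
    exfalso
    have : (128 : Nat) ≤ code := by omega
    rw [List.drop_eq_nil_of_le (by omega)] at hne
    exact hne rfl
  | succ f ih =>
    intro cs code hlen hf hne
    have hcode : code < 128 := by
      by_contra h
      rw [List.drop_eq_nil_of_le (by omega)] at hne
      exact hne rfl
    have hdrop : cs.drop code = cs[code] :: cs.drop (code + 1) :=
      List.drop_eq_getElem_cons (by omega)
    have hgetD : cs.getD code 0 = cs[code] := by
      rw [List.getD_eq_getElem?_getD, List.getElem?_eq_getElem (by omega)]; rfl
    rw [pvFindNext]
    by_cases hz : cs.getD code 0 = 0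
    · rw [if_pos hz]
      have hexp : pvExpand (cs.drop code) code = pvExpand (cs.drop (code + 1)) (code + 1) := by
        rw [hdrop, ← hgetD, hz, pvExpand]; simp
      rw [hexp] at hne
      obtain ⟨h1, h2, h3, h4⟩ := ih cs (code + 1) hlen (by omega) hne
      exact ⟨by omega, h2, h3, by rw [hexp, h4]⟩
    · rw [if_neg hz]
      exact ⟨le_rfl, hcode, hz, rfl⟩

-- decrementing the slot the pointer stopped at removes the head of the expansion
lemma pvExpand_decrement (cs : List Nat) (j : Nat) (hlen : cs.length = 128) (hj : j < 128)
    (hz : cs.getD j 0 ≠ 0) :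
    pvExpand (cs.drop j) j =
      Char.ofNat j :: pvExpand ((cs.set j (cs.getD j 0 - 1)).drop j) j := by
  have hj' : j < cs.length := by omega
  have hgetD : cs.getD j 0 = cs[j] := by
    rw [List.getD_eq_getElem?_getD, List.getElem?_eq_getElem hj']; rfl
  obtain ⟨m, hm⟩ : ∃ m, cs[j] = m + 1 := by
    rw [hgetD] at hz; exact ⟨cs[j] - 1, by omega⟩
  have hdrop : cs.drop j = cs[j] :: cs.drop (j + 1) := List.drop_eq_getElem_cons hj'
  have hdrop' : (cs.set j (cs.getD j 0 - 1)).drop j = m :: cs.drop (j + 1) := by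
    rw [List.drop_set, if_neg (by omega), Nat.sub_self]
    rw [hdrop, List.set_cons_zero, hgetD, hm]
    simp
  rw [hdrop, hdrop', hm, pvExpand, pvExpand, List.replicate_succ]
  simp

-- B's emitting loop computes pvFill against the expansion of the remaining table
lemma emitLoop : ∀ (l out : List Char) (cs : List Nat) (code : Nat), cs.length = 128 →
    (pvExpand (cs.drop code) code).length = (l.filter (fun c => c ≠ ' ')).length →
    (l.foldl (fun (s : List Char × List Nat × Nat) ch =>
        if ch = ' ' then (s.1 ++ [' '], s.2)
        else
          let j := pvFindNext s.2.1 s.2.2 128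
          (s.1 ++ [Char.ofNat j], s.2.1.set j (s.2.1.getD j 0 - 1), j)) (out, cs, code)).1
      = out ++ pvFill l (pvExpand (cs.drop code) code) := by
  intro l
  induction l with
  | nil => intro out cs code _ _; simp [pvFill]
  | cons ch l ih =>
    intro out cs code hlen hcnt
    rw [List.filter_cons] at hcnt
    rw [List.foldl_cons]
    by_cases hch : ch = ' '
    · subst hch
      rw [if_pos rfl]
      rw [if_neg (by simp)] at hcnt
      rw [ih (out ++ [' ']) cs code hlen hcnt]
      simp [pvFill]
    · rw [if_neg hch]
      rw [if_pos (by simpa using hch), List.length_cons] at hcnt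
      have hne : pvExpand (cs.drop code) code ≠ [] := by
        intro h; rw [h] at hcnt; simp at hcnt
      obtain ⟨h1, h2, h3, h4⟩ := pvFindNext_spec 128 cs code hlen (by omega) hne
      set j := pvFindNext cs code 128 with hj
      have hdec := pvExpand_decrement cs j hlen h2 h3
      have hlen' : (cs.set j (cs.getD j 0 - 1)).length = 128 := by simpa using hlen
      have hcnt' : (pvExpand ((cs.set j (cs.getD j 0 - 1)).drop j) j).length
          = (l.filter (fun c => c ≠ ' ')).length := by
        have : (pvExpand (cs.drop code) code).length
            = (pvExpand ((cs.set j (cs.getD j 0 - 1)).drop j) j).length + 1 := by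
          rw [h4, hdec]; simp
        omega
      simp only
      rw [ih (out ++ [Char.ofNat j]) _ j hlen' hcnt']
      rw [pvFill, if_neg hch, h4, hdec]
      simp

lemma dom_codes (n : String) (h : Dom_true_alphabetic n) :
    ∀ ch ∈ n.toList, ch.toNat < 128 := by
  intro ch hch
  have := List.all_eq_true.mp h ch hch
  simp only [pvDomChar, Bool.or_eq_true, Bool.and_eq_true, decide_eq_true_eq, beq_iff_eq] at this
  omega

-- ===== VERDICT (by name: the statement is the Claim_ definition above) =====
theorem true_alphabetic_spec : Claim_equal_true_alphabetic := by
  intro n hdom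
  unfold Spec_true_alphabetic true_alphabetic true_alphabetic_alt
  dsimp only
  obtain ⟨hlen128, hperm⟩ := buildLoop n.toList (List.replicate 128 0)
    (dom_codes n hdom) (by simp)
  rw [pvExpand_replicate_zero, List.append_nil] at hperm
  set counts := n.toList.foldl
    (fun cs ch => if ch ≠ ' ' then cs.set ch.toNat (cs.getD ch.toNat 0 + 1) else cs)
    (List.replicate 128 0) with hcounts
  have hsorted : PySem.List.sorted (n.toList.filter (fun c => c ≠ ' ')) (fun c => c) false
      = pvExpand counts 0 :=
    PySem.List.sorted_id_eq_of_perm_of_pairwise _ _ hperm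
      (pvExpand_pairwise counts 0 (by omega))
  have hcnt0 : (pvExpand (counts.drop 0) 0).length
      = (n.toList.filter (fun c => c ≠ ' ')).length := by
    rw [List.drop_zero]; exact hperm.length_eq
  rw [replace_toList, hsorted]
  rw [loopA _ n.toList [] 0 (by rw [List.drop_zero] at hcnt0; omega)]
  rw [emitLoop n.toList [] counts 0 hlen128 hcnt0]
  rw [List.drop_zero, List.drop_zero]
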